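-- pv_equiv track=rewrite | github.com/nehcuh/CherryQuant | scripts/refactor_imports.py | transform_from_import_line
-- ===== SOURCE A (Python) =====
-- from typing import Dict, Iterable, List, Set, Tuple
--
-- PREFIX_MAP: Dict[str, str] = {
--     "ai": "cherryquant.ai",
--     "adapters": "cherryquant.adapters",
--     "services": "cherryquant.services",
--     "web": "cherryquant.web",
-- }
--
-- def transform_from_import_line(line: str) -> Tuple[str, bool]:
--     """
--     仅处理以 'from ' 起始的行：
--       from ai.decision_engine import FuturesDecisionEngine
--       from adapters import data_adapter
--     """
--     original = line
--     # 保留行尾换行符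
--     end = ""
--     if line.endswith("\n"):
--         end = "\n"
--         line = line[:-1]
--
--     ls = line.lstrip()
--     if not ls.startswith("from "):
--         return original, False
--
--     leading = line[: len(line) - len(ls)]
--     # 拆分 'from <module> import <names>'
--     # 注意：尽量稳妥，不处理极端换行续行的复杂情况（大部分场景足够）
--     try:
--         _, tail = ls.split("from ", 1)
--         module, after = tail.split(" import ", 1)
--     except ValueError:
--         # 结构不符合预期，不处理
--         return original, False
--
--     module_strip = module.strip()
--     new_module = module_strip
--     for old, new in PREFIX_MAP.items():
--         if module_strip == old:
--             new_module = new
--             break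
--         if module_strip.startswith(old + "."):
--             new_module = new + module_strip[len(old) :]
--             break
--
--     new_line = f"{leading}from {new_module} import {after}{end}"
--     return (new_line, new_line != original)
-- ===== SOURCE B (Python) =====
-- from typing import Tuple
--
-- # Every value in the original PREFIX_MAP is "cherryquant." + key, so rewriting a
-- # matching module is just prepending "cherryquant.": no mapping scan is needed.
-- PREFIX_HEADS = ("ai", "adapters", "services", "web")
--
-- def transform_from_import_line(line: str) -> Tuple[str, bool]:
--     end = "\n" if line.endswith("\n") else ""
--     body = line[: len(line) - len(end)]
--     ls = body.lstrip()
--     if not ls.startswith("from "):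
--         return line, False
--     j = ls.find(" import ", 5)
--     if j < 0:
--         return line, False
--     ms = ls[5:j].strip()
--     after = ls[j + 8:]
--     k = 0
--     while k < len(ms) and ms[k] != ".":
--         k += 1
--     if ms[:k] in PREFIX_HEADS:
--         ms = "cherryquant." + ms
--     new_line = body[: len(body) - len(ls)] + "from " + ms + " import " + after + end
--     return new_line, new_line != line
-- ===== Notes on version B (the rewrite author's own statement) =====
-- stated objective: simpler
-- what changed: B eliminates the PREFIX_MAP scan entirely by exploiting that every map value equals a single fixed package prefix joined with its key: it partitions the line once with find-based indexing, scans the module up to its first dot, and simply prepends that fixed prefix when the head is one of the four names, instead of A's per-key equality/startswith loop with slice-and-concatenate replacement.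
import Mathlib
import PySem

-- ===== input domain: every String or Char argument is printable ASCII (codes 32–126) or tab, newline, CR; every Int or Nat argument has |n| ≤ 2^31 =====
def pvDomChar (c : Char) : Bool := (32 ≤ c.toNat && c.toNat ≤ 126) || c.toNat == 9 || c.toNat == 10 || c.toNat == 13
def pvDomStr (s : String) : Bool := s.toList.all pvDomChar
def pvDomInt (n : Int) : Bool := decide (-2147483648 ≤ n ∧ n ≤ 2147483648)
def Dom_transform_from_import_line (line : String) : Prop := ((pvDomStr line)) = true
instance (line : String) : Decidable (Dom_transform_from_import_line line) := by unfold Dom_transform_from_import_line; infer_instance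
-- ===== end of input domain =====

-- B drops the PREFIX_MAP scan entirely: every map value is the one fixed package prefix joined
-- with its key, so B parses the module with a single find-based partition, scans to the first dot,
-- and merely prepends that fixed prefix when the head is one of the four names; objective: simpler.

-- ===== PORT A =====
def pvPrefixPairs : List (String × String) :=
  [("ai", "cherryquant.ai"), ("adapters", "cherryquant.adapters"),
   ("services", "cherryquant.services"), ("web", "cherryquant.web")]

-- A's 'for old, new in PREFIX_MAP.items(): … break' as structural recursion over the pairs
def pvPickA : List (String × String) → String → String
  | [], m => m
  | (old, nw) :: rest, m =>
    if m == old then nw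
    else if PySem.Str.startswith m (old ++ ".") then
      nw ++ PySem.Str.slice m (some (PySem.Str.len old)) none
    else pvPickA rest m

def transform_from_import_line (line : String) : String × Bool :=
  let original := line
  let end_ : String := if PySem.Str.endswith line "\n" then "\n" else ""
  let line1 : String := if PySem.Str.endswith line "\n" then PySem.Str.slice line none (some (-1)) else line
  let ls := PySem.Str.lstrip line1
  if !PySem.Str.startswith ls "from " then (original, false)
  else
    let leading := PySem.Str.slice line1 none (some (PySem.Str.len line1 - PySem.Str.len ls))
    match PySem.Str.splitMax? ls "from " 1 with
    | some [_, tail] =>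
      match PySem.Str.splitMax? tail " import " 1 with
      | some [module, after] =>
        let module_strip := PySem.Str.strip module
        let new_module := pvPickA pvPrefixPairs module_strip
        let new_line := leading ++ "from " ++ new_module ++ " import " ++ after ++ end_
        (new_line, new_line != original)
      | _ => (original, false)   -- ValueError: ' import ' absent
    | _ => (original, false)     -- ValueError (unreachable: ls starts with 'from ')

-- ===== PORT B =====
def pvHeads : List String := ["ai", "adapters", "services", "web"]

-- Source B's 'while k < len(ms) and ms[k] != ".": k += 1' — k as structural recursion over the chars
def pvHeadLen : List Char → Nat
  | [] => 0
  | c :: r => if c = '.' then 0 else pvHeadLen r + 1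

def transform_from_import_line_alt (line : String) : String × Bool :=
  let end_ : String := if PySem.Str.endswith line "\n" then "\n" else ""
  let body : String := PySem.Str.slice line none (some (PySem.Str.len line - PySem.Str.len end_))
  let ls := PySem.Str.lstrip body
  if !PySem.Str.startswith ls "from " then (line, false)
  else
    let j := PySem.Str.findFrom ls " import " 5 none
    if j < 0 then (line, false)
    else
      let ms := PySem.Str.strip (PySem.Str.slice ls (some 5) (some j))
      let after := PySem.Str.slice ls (some (j + 8)) none
      let k : Nat := pvHeadLen ms.toList
      let ms2 := if pvHeads.contains (PySem.Str.slice ms none (some (k : Int))) then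
          "cherryquant." ++ ms else ms
      let new_line := PySem.Str.slice body none (some (PySem.Str.len body - PySem.Str.len ls)) ++
          "from " ++ ms2 ++ " import " ++ after ++ end_
      (new_line, new_line != line)

-- ===== PRECONDITION & SPEC =====
def Spec_transform_from_import_line (line : String) (out : String × Bool) : Prop := out = transform_from_import_line_alt line
instance (line : String) (out : String × Bool) : Decidable (Spec_transform_from_import_line line out) := by unfold Spec_transform_from_import_line; infer_instance

-- ===== CLAIM (what is proved, stated in full; the proofs are below) =====
def Claim_equal_transform_from_import_line : Prop := ∀ (line : String), Dom_transform_from_import_line line → Spec_transform_from_import_line line (transform_from_import_line line)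

-- ===== LEMMAS AND PROOFS =====
set_option maxHeartbeats 1000000

-- first index at which sep occurs as a prefix (none if sep never occurs), proof-only
def pvFirstOcc (sep : List Char) : List Char → Option Nat
  | [] => none
  | l@(_ :: rest) => if sep.isPrefixOf l then some 0 else (pvFirstOcc sep rest).map (· + 1)

theorem go_zero (sep : List Char) (fuel : Nat) (l cur : List Char) (acc : List (List Char)) :
    PySem.Chars.splitOnMax.go sep fuel 0 l cur acc = ((cur.reverse ++ l) :: acc).reverse := by
  cases fuel <;> cases l <;> simp [PySem.Chars.splitOnMax.go]

theorem pv_split_from_list (l : List Char) (h : "from ".toList <+: l) :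
    PySem.Chars.splitOnMax l "from ".toList 1 = [[], l.drop 5] := by
  obtain ⟨t, rfl⟩ := h
  simp [PySem.Chars.splitOnMax, PySem.Chars.splitOnMax.go, List.isPrefixOf, go_zero]

-- ls starts with "from "  ⇒  ls.split("from ", 1) = ["", ls[5:]]
theorem pv_split_from (ls : String) (h : PySem.Str.startswith ls "from " = true) :
    PySem.Str.splitMax? ls "from " 1 = some ["", PySem.Str.slice ls (some 5) none] := by
  rw [PySem.Str.startswith_eq, PySem.Chars.startswith] at h
  have hp : "from ".toList <+: ls.toList := List.isPrefixOf_iff_prefix.mp h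
  rw [PySem.Str.splitMax?, PySem.Chars.splitMax?]
  simp only [if_neg (by decide : ¬("from ".toList.isEmpty = true))]
  rw [pv_split_from_list ls.toList hp]
  rw [PySem.Str.slice, PySem.Chars.slice_eq_listSlice,
      show ((5:Int) = ((5:Nat):Int)) from rfl, PySem.List.slice_from_natCast]
  rfl

-- find.go locates the first occurrence
theorem pv_findgo (sep : List Char) (hsep : sep.isEmpty = false) :
    ∀ (l : List Char) (k : Nat), PySem.Chars.find.go sep l k =
      match pvFirstOcc sep l with
      | none => -1
      | some f => ((k + f : Nat) : Int) := by
  intro l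
  induction l with
  | nil => intro k; simp [PySem.Chars.find.go, pvFirstOcc, hsep]
  | cons c rest ih =>
    intro k
    by_cases hp : sep.isPrefixOf (c :: rest) = true
    · simp [PySem.Chars.find.go, pvFirstOcc, hp]
    · rw [Bool.not_eq_true] at hp
      simp only [PySem.Chars.find.go, pvFirstOcc, hp, Bool.false_eq_true, if_false]
      rw [ih (k + 1)]
      cases hocc : pvFirstOcc sep rest with
      | none => simp
      | some f =>
        simp only [Option.map_some]
        show ((k + 1 + f : Nat) : Int) = ((k + (f + 1) : Nat) : Int)
        norm_cast
        omega

-- splitOnMax.go with maxsplit 1 partitions at the first occurrence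
theorem pv_go_one (sep : List Char) (_hsep : sep ≠ []) :
    ∀ (l : List Char) (fuel : Nat) (cur : List Char) (acc : List (List Char)), l.length < fuel →
    PySem.Chars.splitOnMax.go sep fuel 1 l cur acc =
      match pvFirstOcc sep l with
      | none => ((cur.reverse ++ l) :: acc).reverse
      | some f => ((l.drop (f + sep.length)) :: (cur.reverse ++ l.take f) :: acc).reverse := by
  intro l
  induction l with
  | nil =>
    intro fuel cur acc h
    cases fuel with
    | zero => omega
    | succ f => simp [PySem.Chars.splitOnMax.go, pvFirstOcc]
  | cons c rest ih =>
    intro fuel cur acc h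
    cases fuel with
    | zero => omega
    | succ f'
    · by_cases hp : sep.isPrefixOf (c :: rest) = true
      · simp only [PySem.Chars.splitOnMax.go, hp, pvFirstOcc,
                   if_neg (by omega : ¬(1:Nat) = 0), if_true]
        rw [go_zero]
        simp
      · rw [Bool.not_eq_true] at hp
        simp only [PySem.Chars.splitOnMax.go, pvFirstOcc, hp, Bool.false_eq_true, if_false,
                   if_neg (by omega : ¬(1:Nat) = 0)]
        have hlt : rest.length < f' := by simp at h; omega
        rw [ih f' (c :: cur) acc hlt]
        cases hocc : pvFirstOcc sep rest with
        | none => simp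
        | some f =>
          simp [List.take_succ_cons]
          rw [show f + 1 + sep.length = (f + sep.length) + 1 from by omega, List.drop_succ_cons]

-- t.split(" import ", 1) in terms of the first occurrence
theorem pv_split_import (t : String) :
    PySem.Str.splitMax? t " import " 1 =
      some (match pvFirstOcc " import ".toList t.toList with
            | none => [t]
            | some f => [String.ofList (t.toList.take f), String.ofList (t.toList.drop (f + 8))]) := by
  rw [PySem.Str.splitMax?, PySem.Chars.splitMax?]
  rw [if_neg (by decide : ¬((" import " : String).toList.isEmpty = true))]
  rw [PySem.Chars.splitOnMax, if_neg (by omega : ¬((1:Int) < 0))]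
  rw [show (Int.toNat 1 = 1) from rfl]
  rw [pv_go_one _ (by decide) _ _ _ _ (by omega)]
  cases hocc : pvFirstOcc " import ".toList t.toList with
  | none => simp [String.ofList_toList]
  | some f => simp

-- B's j = ls.find(" import ", 5) in terms of the first occurrence in ls[5:]
theorem pv_find_eq (ls : String) (h5 : 5 ≤ ls.toList.length) :
    PySem.Str.findFrom ls " import " 5 none =
      match pvFirstOcc " import ".toList (ls.toList.drop 5) with
      | none => -1
      | some f => ((5 + f : Nat) : Int) := by
  rw [PySem.Str.findFrom, show ((5:Int) = ((5:Nat):Int)) from rfl,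
      PySem.Chars.findFrom_natCast _ _ 5 h5, PySem.Chars.find,
      pv_findgo _ (by decide)]
  cases hocc : pvFirstOcc " import ".toList (ls.toList.drop 5) with
  | none => simp
  | some f =>
    simp only []
    rw [if_neg (by omega : ¬(((0 + f : Nat) : Int) = -1))]
    push_cast
    ring

theorem pv_slice5 (ls : String) : (PySem.Str.slice ls (some 5) none).toList = ls.toList.drop 5 := by
  rw [PySem.Str.toList_slice, PySem.Chars.slice_eq_listSlice,
      show ((5:Int) = ((5:Nat):Int)) from rfl, PySem.List.slice_from_natCast]

theorem pv_slice_mod (ls : String) (f : Nat) :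
    PySem.Str.slice ls (some 5) (some ((5 + f : Nat) : Int)) = String.ofList ((ls.toList.drop 5).take f) := by
  rw [PySem.Str.slice, PySem.Chars.slice_eq_listSlice,
      show ((5:Int) = ((5:Nat):Int)) from rfl, PySem.List.slice_natCast]
  rw [Nat.add_sub_cancel_left]

theorem pv_slice_after (ls : String) (f : Nat) :
    PySem.Str.slice ls (some (((5 + f : Nat) : Int) + 8)) none = String.ofList ((ls.toList.drop 5).drop (f + 8)) := by
  rw [show ((((5 + f : Nat) : Int) + 8) = (((13 + f : Nat)) : Int)) from by push_cast; ring]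
  rw [PySem.Str.slice, PySem.Chars.slice_eq_listSlice, PySem.List.slice_from_natCast]
  rw [List.drop_drop, show (5 + (f + 8) = 13 + f) from by omega]

theorem pv_take_headLen : ∀ l : List Char, l.take (pvHeadLen l) = l.takeWhile (· ≠ '.')
  | [] => rfl
  | c :: r => by
    by_cases hc : c = '.'
    · subst hc; simp [pvHeadLen]
    · simp [pvHeadLen, hc, pv_take_headLen r]

-- B's ms[:k] is the part of ms before the first dot
theorem pv_headslice (m : String) :
    PySem.Str.slice m none (some ((pvHeadLen m.toList : Nat) : Int)) = String.ofList (m.toList.takeWhile (· ≠ '.')) := by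
  rw [PySem.Str.slice, PySem.Chars.slice_eq_listSlice, PySem.List.slice_to_natCast, pv_take_headLen]

-- the piece before the first dot equals old  ⇔  A's per-key test (exact match, or old followed by a dot is a prefix)
theorem pv_tw_iff (old m : List Char) (h : '.' ∉ old) :
    m.takeWhile (· ≠ '.') = old ↔ (m = old ∨ old ++ ['.'] <+: m) := by
  constructor
  · intro htw
    have hm := List.takeWhile_append_dropWhile (p := fun c : Char => decide (c ≠ '.')) (l := m)
    cases hd : m.dropWhile (fun c : Char => decide (c ≠ '.')) with
    | nil => left; rw [← hm, hd, htw, List.append_nil]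
    | cons c r =>
      have hc : (fun c : Char => decide (c ≠ '.')) c = false := by
        have h2 := List.head_dropWhile_not (fun c : Char => decide (c ≠ '.')) (l := m) (by rw [hd]; simp)
        simp only [hd, List.head_cons] at h2
        exact h2
      have hc' : c = '.' := by simpa using hc
      right
      refine ⟨r, ?_⟩
      rw [← hm, hd, htw, hc', List.append_assoc]
      rfl
  · rintro (rfl | ⟨t, rfl⟩)
    · exact List.takeWhile_eq_self_iff.mpr (fun a ha => by simp; exact fun hx => h (hx ▸ ha))
    · rw [List.append_assoc]
      rw [List.takeWhile_append_of_pos (fun a ha => by simp; exact fun hx => h (hx ▸ ha))]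
      simp

-- a key hit in A's scan rewrites the module to "cherryquant." ++ module
theorem pv_key_hit (old nw k m : String) (hdot : '.' ∉ old.toList)
    (hnw : nw.toList = "cherryquant.".toList ++ old.toList)
    (hm : m.toList.takeWhile (· ≠ '.') = old.toList) :
    (if m == old then nw
     else if PySem.Str.startswith m (old ++ ".") then nw ++ PySem.Str.slice m (some (PySem.Str.len old)) none
     else k) = "cherryquant." ++ m := by
  rcases (pv_tw_iff _ _ hdot).mp hm with hcase | hcase
  · have hme : m = old := String.toList_inj.mp hcase
    subst hme
    rw [if_pos (beq_self_eq_true m)]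
    apply String.toList_inj.mp
    rw [hnw, String.toList_append]
  · have hne : (m == old) = false := by
      refine beq_eq_false_iff_ne.mpr (fun hme => ?_)
      subst hme
      have := hcase.length_le
      simp at this
    have hsw : PySem.Str.startswith m (old ++ ".") = true := by
      rw [PySem.Str.startswith_eq, PySem.Chars.startswith, List.isPrefixOf_iff_prefix]
      rw [String.toList_append]
      exact hcase
    rw [if_neg (fun hx => Bool.false_ne_true (hne ▸ hx)), if_pos hsw]
    apply String.toList_inj.mp
    have hpre : old.toList <+: m.toList := by
      rcases hcase with ⟨r, hr⟩
      exact ⟨'.' :: r, by rw [← hr]; simp⟩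
    rcases hpre with ⟨r, hr⟩
    rw [String.toList_append, PySem.Str.toList_slice, PySem.Chars.slice_eq_listSlice,
        PySem.Str.len_eq, PySem.List.slice_from_natCast, String.toList_append, hnw,
        ← hr, List.drop_left, List.append_assoc]

theorem pv_key_miss (old nw k m : String) (hdot : '.' ∉ old.toList)
    (hm : ¬ (m.toList.takeWhile (· ≠ '.') = old.toList)) :
    (if m == old then nw
     else if PySem.Str.startswith m (old ++ ".") then nw ++ PySem.Str.slice m (some (PySem.Str.len old)) none
     else k) = k := by
  have h1 : (m == old) = false := by
    refine beq_eq_false_iff_ne.mpr (fun hme => ?_)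
    exact hm ((pv_tw_iff _ _ hdot).mpr (Or.inl (by rw [hme])))
  have h2 : PySem.Str.startswith m (old ++ ".") = false := by
    cases hsw : PySem.Str.startswith m (old ++ ".") with
    | false => rfl
    | true =>
      rw [PySem.Str.startswith_eq, PySem.Chars.startswith, List.isPrefixOf_iff_prefix,
          String.toList_append] at hsw
      exact absurd ((pv_tw_iff _ _ hdot).mpr (Or.inr hsw)) hm
  rw [if_neg (fun hx => Bool.false_ne_true (h1 ▸ hx)), if_neg (fun hx => Bool.false_ne_true (h2 ▸ hx))]

-- A's prefix scan = B's head test with a uniform "cherryquant." prepend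
theorem pv_pick_eq (m : String) :
    pvPickA pvPrefixPairs m =
      (if pvHeads.contains (PySem.Str.slice m none (some ((pvHeadLen m.toList : Nat) : Int))) then
        "cherryquant." ++ m else m) := by
  rw [pv_headslice]
  by_cases h1 : m.toList.takeWhile (· ≠ '.') = ("ai" : String).toList
  · have ho : String.ofList (m.toList.takeWhile (· ≠ '.')) = "ai" := by
      rw [h1, String.ofList_toList]
    rw [ho]
    simp only [pvPickA, pvPrefixPairs]
    rw [pv_key_hit _ _ _ _ (by decide) (by decide) h1]
    rw [if_pos (show pvHeads.contains "ai" = true from by decide)]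
  by_cases h2 : m.toList.takeWhile (· ≠ '.') = ("adapters" : String).toList
  · have ho : String.ofList (m.toList.takeWhile (· ≠ '.')) = "adapters" := by
      rw [h2, String.ofList_toList]
    rw [ho]
    simp only [pvPickA, pvPrefixPairs]
    rw [pv_key_miss _ _ _ _ (by decide) h1, pv_key_hit _ _ _ _ (by decide) (by decide) h2]
    rw [if_pos (show pvHeads.contains "adapters" = true from by decide)]
  by_cases h3 : m.toList.takeWhile (· ≠ '.') = ("services" : String).toList
  · have ho : String.ofList (m.toList.takeWhile (· ≠ '.')) = "services" := by
      rw [h3, String.ofList_toList]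
    rw [ho]
    simp only [pvPickA, pvPrefixPairs]
    rw [pv_key_miss _ _ _ _ (by decide) h1, pv_key_miss _ _ _ _ (by decide) h2,
        pv_key_hit _ _ _ _ (by decide) (by decide) h3]
    rw [if_pos (show pvHeads.contains "services" = true from by decide)]
  by_cases h4 : m.toList.takeWhile (· ≠ '.') = ("web" : String).toList
  · have ho : String.ofList (m.toList.takeWhile (· ≠ '.')) = "web" := by
      rw [h4, String.ofList_toList]
    rw [ho]
    simp only [pvPickA, pvPrefixPairs]
    rw [pv_key_miss _ _ _ _ (by decide) h1, pv_key_miss _ _ _ _ (by decide) h2,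
        pv_key_miss _ _ _ _ (by decide) h3, pv_key_hit _ _ _ _ (by decide) (by decide) h4]
    rw [if_pos (show pvHeads.contains "web" = true from by decide)]
  · simp only [pvPickA, pvPrefixPairs]
    rw [pv_key_miss _ _ _ _ (by decide) h1, pv_key_miss _ _ _ _ (by decide) h2,
        pv_key_miss _ _ _ _ (by decide) h3, pv_key_miss _ _ _ _ (by decide) h4]
    have hnm : String.ofList (m.toList.takeWhile (· ≠ '.')) ∉ pvHeads := by
      intro hmem
      simp only [pvHeads, List.mem_cons] at hmem
      rcases hmem with he | he | he | he | he
      · exact h1 (by rw [← String.toList_ofList (l := m.toList.takeWhile (· ≠ '.')), he])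
      · exact h2 (by rw [← String.toList_ofList (l := m.toList.takeWhile (· ≠ '.')), he])
      · exact h3 (by rw [← String.toList_ofList (l := m.toList.takeWhile (· ≠ '.')), he])
      · exact h4 (by rw [← String.toList_ofList (l := m.toList.takeWhile (· ≠ '.')), he])
      · cases he
    have hc : pvHeads.contains (String.ofList (m.toList.takeWhile (· ≠ '.'))) = false := by
      cases hct : pvHeads.contains (String.ofList (m.toList.takeWhile (· ≠ '.'))) with
      | false => rfl
      | true => exact absurd (List.contains_iff_mem.mp hct) hnm
    rw [if_neg (fun hx => Bool.false_ne_true (hc ▸ hx))]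

theorem pv_slice_len (s : String) : PySem.Str.slice s none (some (PySem.Str.len s)) = s := by
  rw [PySem.Str.slice, PySem.Chars.slice_eq_listSlice, PySem.Str.len_eq,
      PySem.List.slice_to_natCast, List.take_length, String.ofList_toList]

theorem pv_body_newline (line : String) (he : PySem.Str.endswith line "\n" = true) :
    PySem.Str.slice line none (some (PySem.Str.len line - 1)) = PySem.Str.slice line none (some (-1)) := by
  have hlen : 1 ≤ line.toList.length := by
    rw [PySem.Str.endswith_eq, PySem.Chars.endswith_iff] at he
    have := he.length_le
    simpa using this
  apply String.toList_inj.mp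
  rw [PySem.Str.toList_slice, PySem.Chars.slice_eq_listSlice, PySem.Str.len_eq,
      show ((line.toList.length : Int) - 1 = ((line.toList.length - 1 : Nat) : Int)) from by omega,
      PySem.List.slice_to_natCast, PySem.Str.slice_to_neg_one, List.dropLast_eq_take]

theorem pv_h5 (t : String) (hs : PySem.Str.startswith (PySem.Str.lstrip t) "from " = true) :
    5 ≤ (PySem.Str.lstrip t).toList.length := by
  rw [PySem.Str.startswith_eq, PySem.Chars.startswith] at hs
  have := (List.isPrefixOf_iff_prefix.mp hs).length_le
  simpa using this


set_option maxHeartbeats 1000000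
theorem pv_main (line : String) :
    transform_from_import_line line = transform_from_import_line_alt line := by
  unfold transform_from_import_line transform_from_import_line_alt
  by_cases he : PySem.Str.endswith line "\n" = true
  · simp only [he, if_true]
    rw [show PySem.Str.len "\n" = 1 from by decide, pv_body_newline line he]
    by_cases hs : PySem.Str.startswith (PySem.Str.lstrip (PySem.Str.slice line none (some (-1)))) "from " = true
    · simp only [hs, Bool.not_true, Bool.false_eq_true, if_false]
      rw [pv_split_from _ hs]
      simp only []
      rw [pv_split_import, pv_slice5, pv_find_eq _ (pv_h5 _ hs)]
      cases hocc : pvFirstOcc " import ".toList ((PySem.Str.lstrip (PySem.Str.slice line none (some (-1)))).toList.drop 5) with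
      | none =>
        simp only []
        rw [if_pos (by omega : (-1 : Int) < 0)]
      | some f =>
        simp only []
        rw [if_neg (by omega : ¬(((5 + f : Nat) : Int) < 0))]
        rw [pv_slice_mod, pv_slice_after]
        rw [pv_pick_eq]
    · rw [Bool.not_eq_true] at hs
      simp only [hs, Bool.not_false, if_true]
  · rw [Bool.not_eq_true] at he
    simp only [he, Bool.false_eq_true, if_false]
    rw [show PySem.Str.len "" = 0 from by decide, sub_zero, pv_slice_len]
    by_cases hs : PySem.Str.startswith (PySem.Str.lstrip line) "from " = true
    · simp only [hs, Bool.not_true, Bool.false_eq_true, if_false]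
      rw [pv_split_from _ hs]
      simp only []
      rw [pv_split_import, pv_slice5, pv_find_eq _ (pv_h5 _ hs)]
      cases hocc : pvFirstOcc " import ".toList ((PySem.Str.lstrip line).toList.drop 5) with
      | none =>
        simp only []
        rw [if_pos (by omega : (-1 : Int) < 0)]
      | some f =>
        simp only []
        rw [if_neg (by omega : ¬(((5 + f : Nat) : Int) < 0))]
        rw [pv_slice_mod, pv_slice_after]
        rw [pv_pick_eq]
    · rw [Bool.not_eq_true] at hs
      simp only [hs, Bool.not_false, if_true]

-- ===== VERDICT (by name: the statement is the Claim_ definition above) =====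
theorem transform_from_import_line_spec : Claim_equal_transform_from_import_line := by
  intro line _
  unfold Spec_transform_from_import_line
  exact pv_main line
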